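-- pv_equiv track=rewrite | github.com/aabclara/MetNumericos | help.py | RegraDescartes
-- ===== SOURCE A (Python) =====
-- def RegraDescartes(coeficientes):
--     # Variação de sinais para raízes positivas
--     variacoes_pos = 0
--     for i in range(len(coeficientes) - 1):
--         if coeficientes[i] * coeficientes[i + 1] < 0:
--             variacoes_pos += 1
--
--     # Variação de sinais para raízes negativas (substituindo x por -x)
--     termos_neg = []
--     grau = len(coeficientes) - 1
--     for i in range(len(coeficientes)):
--         coef = coeficientes[i]
--         # Inverte o sinal para termos de grau ímpar (substitui x por -x)
--         if grau % 2 != 0: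
--             coef *= -1
--         termos_neg.append(coef)
--         grau -= 1
--
--     variacoes_neg = 0
--     for i in range(len(termos_neg) - 1):
--         if termos_neg[i] * termos_neg[i + 1] < 0:
--             variacoes_neg += 1
--
--     # Retorna as possíveis raízes positivas e negativas
--     return (f"Possíveis raízes positivas: {variacoes_pos}\n"
--             f"Possíveis raízes negativas: {variacoes_neg}")
-- ===== SOURCE B (Python) =====
-- def RegraDescartes(coeficientes):
--     # One pass over adjacent pairs: a sign variation of p(x) is an adjacent
--     # product < 0; substituting x -> -x negates every adjacent product, so a
--     # variation of p(-x) is exactly an adjacent product > 0 (zeros count to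
--     # neither side either way).
--     variacoes_pos = 0
--     variacoes_neg = 0
--     for a, b in zip(coeficientes, coeficientes[1:]):
--         p = a * b
--         if p < 0:
--             variacoes_pos += 1
--         elif p > 0:
--             variacoes_neg += 1
--     return (f"Possíveis raízes positivas: {variacoes_pos}\n"
--             f"Possíveis raízes negativas: {variacoes_neg}")
-- ===== Notes on version B (the rewrite author's own statement) =====
-- stated objective: simpler
-- what changed: B counts both kinds of sign variations in a single pass over adjacent coefficient pairs, using that substituting x by -x negates every adjacent product (so negative-root variations are exactly the same-sign pairs), eliminating A's construction of the transformed coefficient list and its two extra index loops.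
import Mathlib
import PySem

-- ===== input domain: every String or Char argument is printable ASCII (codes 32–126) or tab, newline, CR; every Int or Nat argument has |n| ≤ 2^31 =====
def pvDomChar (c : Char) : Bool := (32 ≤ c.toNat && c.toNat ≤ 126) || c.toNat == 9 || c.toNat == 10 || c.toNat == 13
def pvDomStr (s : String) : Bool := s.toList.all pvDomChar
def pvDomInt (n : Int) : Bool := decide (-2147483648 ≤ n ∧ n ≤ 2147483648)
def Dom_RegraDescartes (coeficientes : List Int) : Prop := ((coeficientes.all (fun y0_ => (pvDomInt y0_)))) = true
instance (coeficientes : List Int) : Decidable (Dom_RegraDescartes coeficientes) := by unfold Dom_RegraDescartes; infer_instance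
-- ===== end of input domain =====

-- B replaces A's three loops and transformed-coefficient list by one pass over adjacent
-- coefficient pairs (product < 0 → positive-root variation, product > 0 → negative-root one).
-- ===== PORT A =====
def RegraDescartes (coeficientes : List Int) : String :=
  let variacoes_pos : Int :=
    (PySem.List.pyRange 0 (PySem.List.len coeficientes - 1) 1).foldl
      (fun acc i =>
        if PySem.List.pyGetD coeficientes i 0 * PySem.List.pyGetD coeficientes (i + 1) 0 < 0
        then acc + 1 else acc) 0
  let st :=
    (PySem.List.pyRange 0 (PySem.List.len coeficientes) 1).foldl
      (fun (st : List Int × Int) i =>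
        let coef := PySem.List.pyGetD coeficientes i 0
        let coef := if st.2 % 2 ≠ 0 then coef * (-1) else coef
        (st.1 ++ [coef], st.2 - 1))
      ([], PySem.List.len coeficientes - 1)
  let termos_neg := st.1
  let variacoes_neg : Int :=
    (PySem.List.pyRange 0 (PySem.List.len termos_neg - 1) 1).foldl
      (fun acc i =>
        if PySem.List.pyGetD termos_neg i 0 * PySem.List.pyGetD termos_neg (i + 1) 0 < 0
        then acc + 1 else acc) 0
  "Possíveis raízes positivas: " ++ PySem.Int.toStr variacoes_pos ++
    "\nPossíveis raízes negativas: " ++ PySem.Int.toStr variacoes_neg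

-- ===== PORT B =====
-- B: one pass over adjacent pairs; coeficientes[1:] is exactly List.drop 1.
def RegraDescartes_alt (coeficientes : List Int) : String :=
  let st :=
    (coeficientes.zip (coeficientes.drop 1)).foldl
      (fun (st : Int × Int) ab =>
        let p := ab.1 * ab.2
        if p < 0 then (st.1 + 1, st.2)
        else if p > 0 then (st.1, st.2 + 1)
        else st)
      (0, 0)
  "Possíveis raízes positivas: " ++ PySem.Int.toStr st.1 ++
    "\nPossíveis raízes negativas: " ++ PySem.Int.toStr st.2

-- ===== PRECONDITION & SPEC =====
def Spec_RegraDescartes (coeficientes : List Int) (out : String) : Prop := out = RegraDescartes_alt coeficientes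
instance (coeficientes : List Int) (out : String) : Decidable (Spec_RegraDescartes coeficientes out) := by unfold Spec_RegraDescartes; infer_instance

-- ===== CLAIM (what is proved, stated in full; the proofs are below) =====
def Claim_equal_RegraDescartes : Prop := ∀ (coeficientes : List Int), Dom_RegraDescartes coeficientes → Spec_RegraDescartes coeficientes (RegraDescartes coeficientes)

-- ===== LEMMAS AND PROOFS =====

-- B's pair fold computes the two countP's.
theorem pairfold_eq (l : List (Int × Int)) (p n : Int) :
    l.foldl
      (fun (st : Int × Int) ab =>
        if ab.1 * ab.2 < 0 then (st.1 + 1, st.2)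
        else if ab.1 * ab.2 > 0 then (st.1, st.2 + 1)
        else st)
      (p, n)
    = (p + (l.countP (fun ab => decide (ab.1 * ab.2 < 0)) : Int),
       n + (l.countP (fun ab => decide (ab.1 * ab.2 > 0)) : Int)) := by
  induction l generalizing p n with
  | nil => simp
  | cons a t ih =>
    simp only [List.foldl_cons]
    split_ifs with h1 h2
    · rw [ih]
      have h2 : ¬ a.1 * a.2 > 0 := by omega
      simp only [List.countP_cons, h1, h2, decide_true, decide_false,
        Prod.mk.injEq]
      constructor <;> (push_cast; omega)
    · rw [ih]
      simp only [List.countP_cons, h1, h2, decide_true, decide_false,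
        Prod.mk.injEq]
      constructor <;> (push_cast; omega)
    · rw [ih]
      simp only [List.countP_cons, h1, h2, decide_false,
        Prod.mk.injEq]
      constructor <;> (push_cast; omega)

-- index-pair count over a range equals the count over zipped adjacent pairs
theorem countP_range_pairs (q : Int → Int → Bool) (xs : List Int) :
    (List.range (xs.length - 1)).countP (fun k => q (xs.getD k 0) (xs.getD (k + 1) 0))
      = (xs.zip (xs.drop 1)).countP (fun ab => q ab.1 ab.2) := by
  induction xs with
  | nil => simp
  | cons a rest ih =>
    cases rest with
    | nil => simp
    | cons b t =>
      have hlen : (a :: b :: t).length - 1 = (b :: t).length - 1 + 1 := by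
        simp
      rw [hlen, List.range_succ_eq_map, List.countP_cons, List.countP_map]
      have hcomp : ((fun k => q ((a :: b :: t).getD k 0) ((a :: b :: t).getD (k + 1) 0)) ∘ Nat.succ)
          = fun k => q ((b :: t).getD k 0) ((b :: t).getD (k + 1) 0) := by
        funext k
        simp [Function.comp]
      rw [hcomp, ih]
      simp [List.countP_cons, Nat.add_comm]

-- A's termos_neg-building fold, closed form.
theorem build_termos (xs : List Int) (m : Nat) (g : Int) (acc : List Int) :
    (List.range m).foldl
      (fun (st : List Int × Int) k =>
        (st.1 ++ [if st.2 % 2 ≠ 0 then xs.getD k 0 * (-1) else xs.getD k 0], st.2 - 1))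
      (acc, g)
    = (acc ++ (List.range m).map
        (fun (k : Nat) => if (g - (k : Int)) % 2 ≠ 0 then xs.getD k 0 * (-1) else xs.getD k 0),
       g - (m : Int)) := by
  induction m with
  | zero => simp
  | succ m ih =>
    rw [List.range_succ, List.foldl_append, ih, List.map_append]
    simp only [List.foldl_cons, List.foldl_nil, List.map_cons, List.map_nil,
      List.append_assoc, Prod.mk.injEq]
    constructor
    · trivial
    · push_cast; ring

-- sign flip: adjacent product of the transformed terms is negative iff the
-- original adjacent product is positive.
theorem sign_flip (g a b : Int) :
    ((if g % 2 ≠ 0 then a * (-1) else a) * (if (g - 1) % 2 ≠ 0 then b * (-1) else b) < 0)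
      ↔ (a * b > 0) := by
  have hg : g % 2 = 0 ∨ g % 2 = 1 := by omega
  rcases hg with h | h
  · rw [if_neg (by omega), if_pos (by omega)]
    constructor <;> intro hh <;> nlinarith
  · rw [if_pos (by omega), if_neg (by omega)]
    constructor <;> intro hh <;> nlinarith

-- ===== VERDICT (by name: the statement is the Claim_ definition above) =====
theorem RegraDescartes_spec : Claim_equal_RegraDescartes := by
  intro xs _
  unfold Spec_RegraDescartes RegraDescartes RegraDescartes_alt
  simp only [PySem.List.len_eq, PySem.List.pyRange_one, Int.sub_zero, List.foldl_map, zero_add,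
    PySem.List.pyGetD_natCast]
  have hcast : ∀ (l : List Int) (y : Nat), PySem.List.pyGetD l ((y : Int) + 1) 0 = l.getD (y + 1) 0 := by
    intro l y
    rw [show ((y : Int) + 1) = ((y + 1 : Nat) : Int) by push_cast; ring, PySem.List.pyGetD_natCast]
  simp only [hcast]
  rw [pairfold_eq]
  rw [build_termos xs ((xs.length : Int)).toNat ((xs.length : Int) - 1) []]
  have h1 : ((xs.length : Int)).toNat = xs.length := by omega
  have h2 : ((xs.length : Int) - 1).toNat = xs.length - 1 := by omega
  simp only [h1, h2, List.nil_append, List.length_map, List.length_range]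
  rw [PySem.List.foldl_ite_add_one, PySem.List.foldl_ite_add_one]
  have hneg : (List.range (xs.length - 1)).countP
      (fun y => decide (((List.range xs.length).map
          (fun (k : Nat) => if ((xs.length : Int) - 1 - (k : Int)) % 2 ≠ 0 then xs.getD k 0 * -1 else xs.getD k 0)).getD y 0 *
        ((List.range xs.length).map
          (fun (k : Nat) => if ((xs.length : Int) - 1 - (k : Int)) % 2 ≠ 0 then xs.getD k 0 * -1 else xs.getD k 0)).getD (y + 1) 0 < 0))
      = (List.range (xs.length - 1)).countP
          (fun y => decide (xs.getD y 0 * xs.getD (y + 1) 0 > 0)) := by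
    apply List.countP_congr
    intro k hk
    rw [List.mem_range] at hk
    have hk1 : k < ((List.range xs.length).map
        (fun (k : Nat) => if ((xs.length : Int) - 1 - (k : Int)) % 2 ≠ 0 then xs.getD k 0 * -1 else xs.getD k 0)).length := by
      simp; omega
    have hk2 : k + 1 < ((List.range xs.length).map
        (fun (k : Nat) => if ((xs.length : Int) - 1 - (k : Int)) % 2 ≠ 0 then xs.getD k 0 * -1 else xs.getD k 0)).length := by
      simp; omega
    rw [List.getD_eq_getElem _ _ hk1, List.getD_eq_getElem _ _ hk2]
    simp only [List.getElem_map, List.getElem_range]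
    have hg : ((xs.length : Int) - 1 - ((k + 1 : Nat) : Int)) = ((xs.length : Int) - 1 - (k : Int)) - 1 := by
      push_cast; ring
    rw [hg]
    simpa using sign_flip ((xs.length : Int) - 1 - (k : Int)) (xs.getD k 0) (xs.getD (k + 1) 0)
  rw [hneg, countP_range_pairs (fun a b => decide (a * b < 0)) xs,
    countP_range_pairs (fun a b => decide (a * b > 0)) xs]
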